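-- pv_equiv track=rewrite | github.com/Cohunefatuniformness570/english-words-knowledge-graph | src/viz/render_frames_rectangular.py | timeline_totals
-- ===== SOURCE A (Python) =====
-- def timeline_totals(timeline: dict[int, dict[str, int]]) -> tuple[dict[int, int], dict[int, int]]:
--     total_counts: dict[int, int] = {}
--     new_counts: dict[int, int] = {}
--     previous: dict[str, int] = {}
--     for year in sorted(timeline.keys()):
--         counts = timeline[year]
--         total_counts[year] = sum(counts.values())
--         new_words = 0
--         for prefix, count in counts.items():
--             prev = previous.get(prefix, 0)
--             if count > prev:
--                 new_words += count - prev
--             previous[prefix] = count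
--         new_counts[year] = new_words
--     return total_counts, new_counts
-- ===== SOURCE B (Python) =====
-- def timeline_totals(timeline: dict[int, dict[str, int]]) -> tuple[dict[int, int], dict[int, int]]:
--     years = sorted(timeline.keys())
--     total_counts = {y: sum(timeline[y].values()) for y in years}
--     new_counts = {}
--     for i, y in enumerate(years):
--         n = 0
--         for prefix, count in timeline[y].items():
--             prev = _prev_count(prefix, years, timeline, i)
--             if count > prev:
--                 n += count - prev
--         new_counts[y] = n
--     return total_counts, new_counts
--
--
-- def _prev_count(prefix, years, timeline, i):
--     # last count recorded for this prefix in any earlier year, 0 if none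
--     for j in range(i - 1, -1, -1):
--         counts = timeline[years[j]]
--         if prefix in counts:
--             return counts[prefix]
--     return 0
-- ===== Notes on version B (the rewrite author's own statement) =====
-- stated objective: alternative
-- what changed: B drops the mutable `previous` dict threaded through the year loop and instead recomputes each prefix's previous count with a stateless backward scan over earlier years (helper _prev_count), building both result dicts directly over the sorted years.
import Mathlib
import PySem

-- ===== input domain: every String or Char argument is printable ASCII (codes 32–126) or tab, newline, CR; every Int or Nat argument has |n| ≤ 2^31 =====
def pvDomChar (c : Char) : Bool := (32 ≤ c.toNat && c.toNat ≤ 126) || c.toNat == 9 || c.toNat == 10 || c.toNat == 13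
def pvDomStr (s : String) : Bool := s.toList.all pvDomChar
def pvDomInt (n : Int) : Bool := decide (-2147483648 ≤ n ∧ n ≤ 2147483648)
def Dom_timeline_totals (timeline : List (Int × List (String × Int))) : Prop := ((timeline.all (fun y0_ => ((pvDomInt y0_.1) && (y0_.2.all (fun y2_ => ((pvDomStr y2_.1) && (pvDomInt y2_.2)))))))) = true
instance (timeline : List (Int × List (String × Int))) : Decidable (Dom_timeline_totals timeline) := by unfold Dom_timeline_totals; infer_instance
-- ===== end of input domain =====

-- B replaces the mutable `previous` dict threaded through the year loop by a stateless
-- backward scan over earlier years for each prefix (alternative decomposition; not faster).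

-- ===== PORT A =====
def timeline_totals (timeline : List (Int × List (String × Int))) : (List (Int × Int)) × (List (Int × Int)) :=
  let tl : PySem.Dict Int (List (String × Int)) := PySem.Dict.mk timeline
  let fin := (PySem.List.sorted tl.keys (fun x => x) false).foldl
    (fun (st : PySem.Dict Int Int × PySem.Dict Int Int × PySem.Dict String Int) year =>
      let counts := tl.getD year []   -- timeline[year]: year comes from the keys, KeyError impossible
      let totalc := st.1.insert year ((counts.map Prod.snd).sum)
      let inner := counts.foldl
        (fun (s : Int × PySem.Dict String Int) pc =>
          let prev := s.2.getD pc.1 0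
          (if pc.2 > prev then s.1 + (pc.2 - prev) else s.1, s.2.insert pc.1 pc.2))
        (0, st.2.2)
      (totalc, st.2.1.insert year inner.1, inner.2))
    (PySem.Dict.empty, PySem.Dict.empty, PySem.Dict.empty)
  (fin.1.items, fin.2.1.items)

-- ===== PORT B =====
-- _prev_count: scan years[i-1] … years[0] for the first one containing the prefix
def pvPrevCount (tl : PySem.Dict Int (List (String × Int))) (p : String) (years : List Int) : Nat → Int
  | 0 => 0
  | j + 1 =>
    let counts := tl.getD (years.getD j 0) []      -- years[j], index always in range
    match (PySem.Dict.mk counts).get? p with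
    | some c => c
    | none => pvPrevCount tl p years j

def timeline_totals_alt (timeline : List (Int × List (String × Int))) : (List (Int × Int)) × (List (Int × Int)) :=
  let tl : PySem.Dict Int (List (String × Int)) := PySem.Dict.mk timeline
  let years := PySem.List.sorted tl.keys (fun x => x) false
  let total := years.map (fun y => (y, ((tl.getD y []).map Prod.snd).sum))
  let newc := (PySem.List.enumerate years 0).map (fun iy =>
    (iy.2, (tl.getD iy.2 []).foldl (fun n pc =>
        let prev := pvPrevCount tl pc.1 years iy.1.toNat
        if pc.2 > prev then n + (pc.2 - prev) else n) 0))
  (total, newc)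

-- ===== PRECONDITION & SPEC =====
-- Pre_ requires distinct year keys and distinct prefix keys inside each year: the Python
-- argument is a dict of dicts, so every actual Python input satisfies this; association
-- lists with duplicate keys represent no Python dict and are excluded.
def Pre_timeline_totals (timeline : List (Int × List (String × Int))) : Prop :=
  (timeline.map Prod.fst).Nodup ∧ ∀ pr ∈ timeline, (pr.2.map Prod.fst).Nodup
instance (timeline : List (Int × List (String × Int))) : Decidable (Pre_timeline_totals timeline) := by
  unfold Pre_timeline_totals; infer_instance

def pvWitness_timeline_totals : (List (Int × List (String × Int))) :=
  [(1, [("a", 2)]), (2, [("a", 3), ("b", 1)])]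

def Spec_timeline_totals (timeline : List (Int × List (String × Int))) (out : (List (Int × Int)) × (List (Int × Int))) : Prop := out = timeline_totals_alt timeline
instance (timeline : List (Int × List (String × Int))) (out : (List (Int × Int)) × (List (Int × Int))) : Decidable (Spec_timeline_totals timeline out) := by unfold Spec_timeline_totals; infer_instance

-- ===== CLAIM (what is proved, stated in full; the proofs are below) =====
def Claim_equal_timeline_totals : Prop := ∀ (timeline : List (Int × List (String × Int))), Dom_timeline_totals timeline → Pre_timeline_totals timeline → Spec_timeline_totals timeline (timeline_totals timeline)

-- ===== LEMMAS AND PROOFS =====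

-- B's per-year entries, named for the induction
def pvTotEntry (tl : PySem.Dict Int (List (String × Int))) (y : Int) : Int × Int :=
  (y, ((tl.getD y []).map Prod.snd).sum)

def pvNewEntry (tl : PySem.Dict Int (List (String × Int))) (years : List Int) (k : Nat) (y : Int) : Int × Int :=
  (y, (tl.getD y []).foldl (fun n pc =>
        let prev := pvPrevCount tl pc.1 years k
        if pc.2 > prev then n + (pc.2 - prev) else n) 0)

-- A's inner loop: with distinct prefixes, the accumulated sum only consults the INITIAL prev
theorem pvInner_fst (counts : List (String × Int)) (h : (counts.map Prod.fst).Nodup)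
    (nw : Int) (prev : PySem.Dict String Int) :
    (counts.foldl
      (fun (s : Int × PySem.Dict String Int) pc =>
        let p := s.2.getD pc.1 0
        (if pc.2 > p then s.1 + (pc.2 - p) else s.1, s.2.insert pc.1 pc.2))
      (nw, prev)).1
    = counts.foldl (fun n pc =>
        let p := prev.getD pc.1 0
        if pc.2 > p then n + (pc.2 - p) else n) nw := by
  induction counts generalizing nw prev with
  | nil => rfl
  | cons hd tail ih =>
    simp only [List.map_cons, List.nodup_cons] at h
    simp only [List.foldl_cons]
    rw [ih h.2]
    apply PySem.List.foldl_congr_mem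
    intro acc x hx
    have hne : x.1 ≠ hd.1 := by
      intro e
      exact h.1 (e ▸ List.mem_map_of_mem hx)
    simp [PySem.Dict.getD_insert, hne]

-- A's inner loop: final prev answers lookups like the dict `counts` laid over the old prev
theorem pvInner_snd (counts : List (String × Int)) (h : (counts.map Prod.fst).Nodup)
    (nw : Int) (prev : PySem.Dict String Int) (p : String) :
    ((counts.foldl
      (fun (s : Int × PySem.Dict String Int) pc =>
        let q := s.2.getD pc.1 0
        (if pc.2 > q then s.1 + (pc.2 - q) else s.1, s.2.insert pc.1 pc.2))
      (nw, prev)).2).getD p 0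
    = match (PySem.Dict.mk counts).get? p with
      | some c => c
      | none => prev.getD p 0 := by
  induction counts generalizing nw prev with
  | nil => rfl
  | cons hd tail ih =>
    obtain ⟨q, c⟩ := hd
    simp only [List.map_cons, List.nodup_cons] at h
    simp only [List.foldl_cons]
    rw [ih h.2]
    rw [PySem.Dict.get?_mk_cons]
    by_cases hqp : q = p
    · subst hqp
      have hnone : (PySem.Dict.mk tail).get? q = none := by
        rw [PySem.Dict.get?_eq_none_iff_not_mem_keys]
        simpa [PySem.Dict.keys_mk] using h.1
      simp [hnone, PySem.Dict.getD_insert_self]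
    · have hb : (q == p) = false := by simp [hqp]
      simp only [hb, Bool.false_eq_true, if_false]
      cases hgp : (PySem.Dict.mk tail).get? p with
      | some c' => simp
      | none => simp [PySem.Dict.getD_insert, Ne.symm hqp]

-- A's loop body, named for the induction (definitionally the fold body of the port)
def pvStepA (tl : PySem.Dict Int (List (String × Int)))
    (st : PySem.Dict Int Int × PySem.Dict Int Int × PySem.Dict String Int) (year : Int) :
    PySem.Dict Int Int × PySem.Dict Int Int × PySem.Dict String Int :=
  let counts := tl.getD year []
  let totalc := st.1.insert year ((counts.map Prod.snd).sum)
  let inner := counts.foldl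
    (fun (s : Int × PySem.Dict String Int) pc =>
      let prev := s.2.getD pc.1 0
      (if pc.2 > prev then s.1 + (pc.2 - prev) else s.1, s.2.insert pc.1 pc.2))
    (0, st.2.2)
  (totalc, st.2.1.insert year inner.1, inner.2)

-- the main loop invariant
theorem pvMain (tl : PySem.Dict Int (List (String × Int))) (ys : List Int)
    (hnd : ys.Nodup) (hcnt : ∀ y ∈ ys, ((tl.getD y []).map Prod.fst).Nodup) :
    ∀ (rest done : List Int) (tc nc : PySem.Dict Int Int) (prev : PySem.Dict String Int),
    ys = done ++ rest →
    tc.keys = done → nc.keys = done →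
    (∀ p, prev.getD p 0 = pvPrevCount tl p ys done.length) →
    (rest.foldl (pvStepA tl) (tc, nc, prev)).1.items = tc.items ++ rest.map (pvTotEntry tl) ∧
    (rest.foldl (pvStepA tl) (tc, nc, prev)).2.1.items
      = nc.items ++ (PySem.List.enumerate rest (done.length : Int)).map
          (fun iy => pvNewEntry tl ys iy.1.toNat iy.2) := by
  intro rest
  induction rest with
  | nil =>
    intro done tc nc prev h htc hnc hprev
    simp [PySem.List.enumerate_nil]
  | cons y rest' ih =>
    intro done tc nc prev h htc hnc hprev
    have hnd' := hnd
    rw [h, List.nodup_append] at hnd'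
    have hyd : y ∉ done := by
      intro hm
      exact (hnd'.2.2 y hm y (by simp)) rfl
    have hymem : y ∈ ys := by rw [h]; simp
    have hcq := hcnt y hymem
    have hcontc : tc.contains y = false := by
      cases hcb : tc.contains y
      · rfl
      · have hk := (PySem.Dict.contains_iff_mem_keys (d := tc) (k := y)).mp hcb
        exact absurd (htc ▸ hk) hyd
    have hconn : nc.contains y = false := by
      cases hcb : nc.contains y
      · rfl
      · have hk := (PySem.Dict.contains_iff_mem_keys (d := nc) (k := y)).mp hcb
        exact absurd (hnc ▸ hk) hyd
    have hgety : ys.getD done.length 0 = y := by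
      rw [h, List.getD_eq_getElem?_getD, List.getElem?_append_right (le_refl _)]
      simp
    -- the updated prev dict realises pvPrevCount at index done.length + 1
    have hprev' : ∀ p,
        (((tl.getD y []).foldl
          (fun (s : Int × PySem.Dict String Int) pc =>
            let prev := s.2.getD pc.1 0
            (if pc.2 > prev then s.1 + (pc.2 - prev) else s.1, s.2.insert pc.1 pc.2))
          (0, prev)).2).getD p 0 = pvPrevCount tl p ys (done.length + 1) := by
      intro p
      rw [pvInner_snd _ hcq]
      simp only [pvPrevCount, hgety]
      cases hg : (PySem.Dict.mk (tl.getD y [])).get? p with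
      | some c => rfl
      | none => exact hprev p
    -- the inner sum is B's entry at index done.length
    have hinner1 : ((tl.getD y []).foldl
          (fun (s : Int × PySem.Dict String Int) pc =>
            let prev := s.2.getD pc.1 0
            (if pc.2 > prev then s.1 + (pc.2 - prev) else s.1, s.2.insert pc.1 pc.2))
          (0, prev)).1 = (pvNewEntry tl ys done.length y).2 := by
      rw [pvInner_fst _ hcq]
      unfold pvNewEntry
      apply PySem.List.foldl_congr_mem
      intro acc x _
      rw [hprev x.1]
    have hstep : pvStepA tl (tc, nc, prev) y =
        (tc.insert y (((tl.getD y []).map Prod.snd).sum),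
         nc.insert y ((tl.getD y []).foldl
          (fun (s : Int × PySem.Dict String Int) pc =>
            let prev := s.2.getD pc.1 0
            (if pc.2 > prev then s.1 + (pc.2 - prev) else s.1, s.2.insert pc.1 pc.2))
          (0, prev)).1,
         ((tl.getD y []).foldl
          (fun (s : Int × PySem.Dict String Int) pc =>
            let prev := s.2.getD pc.1 0
            (if pc.2 > prev then s.1 + (pc.2 - prev) else s.1, s.2.insert pc.1 pc.2))
          (0, prev)).2) := rfl
    obtain ⟨g1, g2⟩ := ih (done ++ [y])
      (tc.insert y (((tl.getD y []).map Prod.snd).sum))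
      (nc.insert y ((tl.getD y []).foldl
          (fun (s : Int × PySem.Dict String Int) pc =>
            let prev := s.2.getD pc.1 0
            (if pc.2 > prev then s.1 + (pc.2 - prev) else s.1, s.2.insert pc.1 pc.2))
          (0, prev)).1)
      (((tl.getD y []).foldl
          (fun (s : Int × PySem.Dict String Int) pc =>
            let prev := s.2.getD pc.1 0
            (if pc.2 > prev then s.1 + (pc.2 - prev) else s.1, s.2.insert pc.1 pc.2))
          (0, prev)).2)
      (by rw [h]; simp)
      (by rw [PySem.Dict.keys_insert_of_not_contains _ _ hcontc, htc])
      (by rw [PySem.Dict.keys_insert_of_not_contains _ _ hconn, hnc])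
      (by simpa using hprev')
    constructor
    · rw [List.foldl_cons, hstep, g1,
        PySem.Dict.items_insert_of_not_contains _ _ hcontc]
      simp [pvTotEntry]
    · rw [List.foldl_cons, hstep, g2,
        PySem.Dict.items_insert_of_not_contains _ _ hconn, hinner1]
      rw [PySem.List.enumerate_cons]
      simp only [List.map_cons, List.length_append, List.length_cons, List.length_nil]
      push_cast
      simp [pvNewEntry]

-- ===== VERDICT (by name: the statement is the Claim_ definition above) =====
theorem timeline_totals_spec : Claim_equal_timeline_totals := by
  intro timeline _ hpre
  unfold Spec_timeline_totals
  set tl : PySem.Dict Int (List (String × Int)) := PySem.Dict.mk timeline with htl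
  set ys : List Int := PySem.List.sorted tl.keys (fun x => x) false with hys
  have hperm : ys.Perm (timeline.map Prod.fst) := by
    simpa [htl, PySem.Dict.keys_mk] using PySem.List.sorted_perm tl.keys (fun x => x) false
  have hnd : ys.Nodup := hperm.nodup_iff.mpr hpre.1
  have hcnt : ∀ y ∈ ys, ((tl.getD y []).map Prod.fst).Nodup := by
    intro y hy
    cases hg : tl.get? y with
    | none => simp [PySem.Dict.getD_of_get?_eq_none _ _ hg]
    | some v =>
      rw [PySem.Dict.getD_of_get?_eq_some _ _ hg]
      have hmem : (y, v) ∈ timeline := PySem.Dict.mem_items_of_get?_eq_some _ hg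
      exact hpre.2 _ hmem
  have hA : timeline_totals timeline =
      ((ys.foldl (pvStepA tl) (PySem.Dict.empty, PySem.Dict.empty, PySem.Dict.empty)).1.items,
       (ys.foldl (pvStepA tl) (PySem.Dict.empty, PySem.Dict.empty, PySem.Dict.empty)).2.1.items) := rfl
  have hB : timeline_totals_alt timeline =
      (ys.map (pvTotEntry tl),
       (PySem.List.enumerate ys 0).map (fun iy => pvNewEntry tl ys iy.1.toNat iy.2)) := rfl
  obtain ⟨g1, g2⟩ := pvMain tl ys hnd hcnt ys [] PySem.Dict.empty PySem.Dict.empty PySem.Dict.empty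
    rfl rfl rfl (by intro p; simp [pvPrevCount])
  rw [hA, hB, g1, g2]
  simp [PySem.Dict.empty]
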